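-- pv_equiv track=rewrite | github.com/minhoyooDEV/backjun-judge | python/y_company_test/y_company_test_4.py | solution
-- ===== SOURCE A (Python) =====
-- def solution(A, X, Y, Z):
--
--     maxX = 0
--     maxY = 0
--     maxZ = 0
--     time = 0
--
--     maxD = max(X, Y, Z)
--
--     data = {}
--
--     while True:
--         for i, car in enumerate(A):
--             if car != 0 and car <= X and time >= maxX:
--                 X -= car
--                 data[i] = time
--                 maxX += car
--                 A[i] = 0
--                 break
--
--         for i, car in enumerate(A):
--             if car != 0 and car <= Y and time >= maxY:
--                 Y -= car
--                 data[i] = time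
--                 maxY += car
--                 A[i] = 0
--                 break
--
--         for i, car in enumerate(A):
--             if car != 0 and car <= Z and time >= maxZ:
--                 Z -= car
--                 data[i] = time
--                 maxZ += car
--                 A[i] = 0
--                 break
--
--         time += 1
--
--         if time > maxD:
--             break
--
--     if len(data) != len(A):
--         return -1
--
--     return data[len(A)- 1]
-- ===== SOURCE B (Python) =====
-- # Event-driven rewrite: instead of ticking time by 1 up to max(X,Y,Z), jump
-- # straight to the next lane-activation time; does not mutate the caller's A
-- # (the original does), return value is identical.
--
-- def _lane(t, arr, cap, mark, data):
--     if t >= mark: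
--         for i, car in enumerate(arr):
--             if car != 0 and car <= cap:
--                 arr[i] = 0
--                 data[i] = t
--                 return cap - car, mark + car, True
--     return cap, mark, False
--
--
-- def solution(A, X, Y, Z):
--     maxD = max(X, Y, Z)
--     n = len(A)
--     arr = list(A)
--     data = {}
--     mx = my = mz = 0
--     t = 0
--     while True:
--         X, mx, a1 = _lane(t, arr, X, mx, data)
--         Y, my, a2 = _lane(t, arr, Y, my, data)
--         Z, mz, a3 = _lane(t, arr, Z, mz, data)
--         if a1 or a2 or a3:
--             nxt = t + 1
--         else:
--             cand = [m for m in (mx, my, mz) if m > t]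
--             nxt = min(cand) if cand else None
--         if nxt is None or nxt > maxD:
--             break
--         t = nxt
--     if len(data) != n:
--         return -1
--     return data[n - 1]
-- ===== Notes on version B (the rewrite author's own statement) =====
-- stated objective: faster
-- what changed: Replaces A's unit-time busy-wait loop (one body execution per time step up to max(X,Y,Z)) with an event-driven loop over a shared lane helper that, when no lane loads a car, jumps straight to the smallest lane-activation mark beyond the current time; B also does not mutate the caller's list, while A zeroes it in place (return values are identical).
-- outside the precondition, e.g. on solution([], 1, 1, 1): A raises KeyError, B raises KeyError
import Mathlib
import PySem

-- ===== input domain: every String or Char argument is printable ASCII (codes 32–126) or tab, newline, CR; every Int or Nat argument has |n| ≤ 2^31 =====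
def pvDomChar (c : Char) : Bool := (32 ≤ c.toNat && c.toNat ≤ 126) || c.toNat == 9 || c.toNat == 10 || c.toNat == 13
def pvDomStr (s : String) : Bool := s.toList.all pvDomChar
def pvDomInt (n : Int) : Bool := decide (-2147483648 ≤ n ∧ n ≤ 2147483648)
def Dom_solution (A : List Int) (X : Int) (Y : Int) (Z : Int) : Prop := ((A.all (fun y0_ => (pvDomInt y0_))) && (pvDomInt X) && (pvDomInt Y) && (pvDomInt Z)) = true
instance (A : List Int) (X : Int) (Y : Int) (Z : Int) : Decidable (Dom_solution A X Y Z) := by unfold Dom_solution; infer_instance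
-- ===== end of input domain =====

-- B replaces A's unit-time busy loop (max(X,Y,Z) iterations) with an event-driven loop that
-- jumps to the next lane-activation time; return values agree (A also mutates its list argument
-- in place, B does not — the claim here is about the return value only).

-- Shared loop state: the list, the three remaining capacities, the three lane-busy-until
-- accumulators, and the index ↦ load-time dict.
structure PVSt where
  arr : List Int
  cx : Int
  cy : Int
  cz : Int
  mx : Int
  my : Int
  mz : Int
  data : PySem.Dict Int Int
deriving Repr, DecidableEq

-- ===== PORT A =====
-- A's inner `for i, car in enumerate(A): if car != 0 and car <= cap and time >= m: … break`:
-- first index/value passing the three-way test.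
def scanA (t cap m : Int) : List Int → Nat → Option (Nat × Int)
  | [], _ => none
  | car :: rest, i =>
    if car ≠ 0 ∧ car ≤ cap ∧ t ≥ m then some (i, car) else scanA t cap m rest (i + 1)

-- one iteration of A's `while True` body: the three for-loops, in order
def stepA (t : Int) (s : PVSt) : PVSt :=
  let s1 := match scanA t s.cx s.mx s.arr 0 with
    | some (i, car) => { s with cx := s.cx - car, data := s.data.insert (i : Int) t,
                                mx := s.mx + car, arr := s.arr.set i 0 }
    | none => s
  let s2 := match scanA t s1.cy s1.my s1.arr 0 with
    | some (i, car) => { s1 with cy := s1.cy - car, data := s1.data.insert (i : Int) t,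
                                 my := s1.my + car, arr := s1.arr.set i 0 }
    | none => s1
  match scanA t s2.cz s2.mz s2.arr 0 with
    | some (i, car) => { s2 with cz := s2.cz - car, data := s2.data.insert (i : Int) t,
                                 mz := s2.mz + car, arr := s2.arr.set i 0 }
    | none => s2

-- the `while True: …; time += 1; if time > maxD: break` loop runs the body exactly at
-- time = 0, 1, …, max(maxD, 0); fuel = that iteration count
def loopA : Nat → Int → PVSt → PVSt
  | 0, _, s => s
  | f + 1, t, s => loopA f (t + 1) (stepA t s)

def solution (A : List Int) (X : Int) (Y : Int) (Z : Int) : Int :=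
  let maxD := max X (max Y Z)
  let s := loopA (maxD.toNat + 1) 0 ⟨A, X, Y, Z, 0, 0, 0, PySem.Dict.empty⟩
  if s.data.size ≠ A.length then -1
  else (s.data.get? ((A.length : Int) - 1)).getD 0
  -- `data[len(A)-1]`: the none branch (Python's KeyError) is reachable only for A = [],
  -- which Pre_solution excludes

-- ===== PORT B =====
-- Source B's _lane helper: first fitting car, guarded by the lane's busy-until mark
def findFit : List Int → Int → Nat → Option (Nat × Int)
  | [], _, _ => none
  | car :: rest, cap, i =>
    if car ≠ 0 ∧ car ≤ cap then some (i, car) else findFit rest cap (i + 1)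

def laneB (t : Int) (arr : List Int) (cap mark : Int) (data : PySem.Dict Int Int) :
    List Int × Int × Int × PySem.Dict Int Int × Bool :=
  if mark ≤ t then
    match findFit arr cap 0 with
    | some (i, car) => (arr.set i 0, cap - car, mark + car, data.insert (i : Int) t, true)
    | none => (arr, cap, mark, data, false)
  else (arr, cap, mark, data, false)

-- one iteration of Source B's while-loop body: the three _lane calls
def stepB (t : Int) (s : PVSt) : PVSt × Bool :=
  let r1 := laneB t s.arr s.cx s.mx s.data
  let r2 := laneB t r1.1 s.cy s.my r1.2.2.2.1
  let r3 := laneB t r2.1 s.cz s.mz r2.2.2.2.1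
  (⟨r3.1, r1.2.1, r2.2.1, r3.2.1, r1.2.2.1, r2.2.2.1, r3.2.2.1, r3.2.2.2.1⟩,
   r1.2.2.2.2 || r2.2.2.2.2 || r3.2.2.2.2)

-- number of still-unloaded cars (termination measure for the event loop)
def nzCount (l : List Int) : Nat := (l.filter (fun c => c ≠ 0)).length

-- termination facts for loopB (cited in decreasing_by)
theorem laneB_noact (t : Int) (arr : List Int) (cap mark : Int) (data : PySem.Dict Int Int)
    (h : (laneB t arr cap mark data).2.2.2.2 = false) :
    laneB t arr cap mark data = (arr, cap, mark, data, false) := by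
  unfold laneB at h ⊢
  split_ifs at h ⊢ with h1
  · cases hf : findFit arr cap 0 with
    | none => simp
    | some p => simp [hf] at h
  · rfl


theorem stepB_noact (t : Int) (s : PVSt) (h : (stepB t s).2 = false) :
    stepB t s = (s, false) := by
  unfold stepB at h ⊢
  simp only [Bool.or_eq_false_iff] at h
  obtain ⟨⟨h1, h2⟩, h3⟩ := h
  have e1 := laneB_noact _ _ _ _ _ h1
  simp only [e1] at h2 h3 ⊢
  have e2 := laneB_noact _ _ _ _ _ h2
  simp only [e2] at h3 ⊢
  have e3 := laneB_noact _ _ _ _ _ h3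
  simp only [e3]
  rfl

theorem findFit_some (cap : Int) : ∀ (arr : List Int) (i j : Nat) (car : Int),
    findFit arr cap i = some (j, car) →
    ∃ k : Nat, j = i + k ∧ arr[k]? = some car ∧ car ≠ 0 ∧ car ≤ cap := by
  intro arr
  induction arr with
  | nil => intro i j car h; simp [findFit] at h
  | cons c rest ih =>
    intro i j car h
    rw [findFit] at h
    split_ifs at h with hc
    · simp only [Option.some.injEq, Prod.mk.injEq] at h
      obtain ⟨rfl, rfl⟩ := h
      exact ⟨0, by omega, by simp, hc.1, hc.2⟩
    · obtain ⟨k, rfl, hg, hnz, hle⟩ := ih (i+1) j car h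
      exact ⟨k + 1, by omega, by simpa using hg, hnz, hle⟩

theorem nzCount_set_lt : ∀ (l : List Int) (k : Nat) (c : Int),
    l[k]? = some c → c ≠ 0 → nzCount (l.set k 0) < nzCount l := by
  intro l
  induction l with
  | nil => intro k c h; simp at h
  | cons a rest ih =>
    intro k c h hc
    cases k with
    | zero =>
      simp at h; subst h
      simp [nzCount, hc]
    | succ k =>
      simp at h
      have := ih k c h hc
      by_cases ha : a = 0 <;> simp [nzCount, List.set, ha] at this ⊢ <;> omega

theorem laneB_count (t : Int) (arr : List Int) (cap mark : Int) (data : PySem.Dict Int Int) :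
    nzCount (laneB t arr cap mark data).1 ≤ nzCount arr ∧
    ((laneB t arr cap mark data).2.2.2.2 = true → nzCount (laneB t arr cap mark data).1 < nzCount arr) := by
  unfold laneB
  split_ifs with h1
  · cases hf : findFit arr cap 0 with
    | none => simp
    | some p =>
      obtain ⟨i, car⟩ := p
      obtain ⟨k, hk, hg, hnz, hle⟩ := findFit_some cap arr 0 i car hf
      have hik : i = k := by omega
      subst hik
      have hlt := nzCount_set_lt arr i car hg hnz
      simp [hf]
      omega
  · simp

theorem stepB_count_lt (t : Int) (s : PVSt) (h : (stepB t s).2 = true) :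
    nzCount (stepB t s).1.arr < nzCount s.arr := by
  unfold stepB at h ⊢
  dsimp only at h ⊢
  simp only [Bool.or_eq_true] at h
  obtain ⟨le1, lt1⟩ := laneB_count t s.arr s.cx s.mx s.data
  obtain ⟨le2, lt2⟩ := laneB_count t (laneB t s.arr s.cx s.mx s.data).1 s.cy s.my (laneB t s.arr s.cx s.mx s.data).2.2.2.1
  obtain ⟨le3, lt3⟩ := laneB_count t (laneB t (laneB t s.arr s.cx s.mx s.data).1 s.cy s.my (laneB t s.arr s.cx s.mx s.data).2.2.2.1).1 s.cz s.mz (laneB t (laneB t s.arr s.cx s.mx s.data).1 s.cy s.my (laneB t s.arr s.cx s.mx s.data).2.2.2.1).2.2.2.1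
  rcases h with (h | h) | h
  · have := lt1 h; omega
  · have := lt2 h; omega
  · have := lt3 h; omega

theorem filter_gt_min_length_lt (marks : List Int) (t u : Int)
    (hu : (marks.filter (fun m => t < m)).min? = some u) :
    (marks.filter (fun m => u < m)).length < (marks.filter (fun m => t < m)).length := by
  rw [List.min?_eq_some_iff] at hu
  obtain ⟨humem, hule⟩ := hu
  simp only [List.mem_filter, decide_eq_true_eq] at humem
  obtain ⟨hum, htu⟩ := humem
  have heq : marks.filter (fun m => u < m) = (marks.filter (fun m => t < m)).filter (fun m => u < m) := by
    rw [List.filter_filter]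
    apply List.filter_congr
    intro a _
    by_cases h : u < a <;> simp [h] <;> omega
  rw [heq, List.length_filter_lt_length_iff_exists]
  exact ⟨u, List.mem_filter.mpr ⟨hum, by simpa using htu⟩, by simp⟩

-- Source B's event loop: act at time t, then jump to the next relevant time (t+1 after a load,
-- else the smallest busy-until mark beyond t), stopping past maxD
def loopB (maxD t : Int) (s : PVSt) : PVSt :=
  let r := stepB t s
  if hf : r.2 = true then
    if t + 1 ≤ maxD then loopB maxD (t + 1) r.1 else r.1
  else
    match hu : ([r.1.mx, r.1.my, r.1.mz].filter (fun m => t < m)).min? with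
    | some u => if u ≤ maxD then loopB maxD u r.1 else r.1
    | none => r.1
termination_by (nzCount s.arr, ([s.mx, s.my, s.mz].filter (fun m => t < m)).length)
decreasing_by
  · exact Prod.Lex.left _ _ (stepB_count_lt t s hf)
  · have hs : stepB t s = (s, false) := stepB_noact t s (by simpa using hf)
    have hr : r = (s, false) := hs
    rw [hr] at hu
    rw [hs]
    exact Prod.Lex.right _ (filter_gt_min_length_lt _ t u hu)

def solution_alt (A : List Int) (X : Int) (Y : Int) (Z : Int) : Int :=
  let maxD := max X (max Y Z)
  let s := loopB maxD 0 ⟨A, X, Y, Z, 0, 0, 0, PySem.Dict.empty⟩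
  if s.data.size ≠ A.length then -1
  else (s.data.get? ((A.length : Int) - 1)).getD 0

-- ===== PRECONDITION & SPEC =====
-- Pre_ excludes only the empty list, on which A (and B) raise KeyError at `data[len(A)-1]`.
def Pre_solution (A : List Int) (X : Int) (Y : Int) (Z : Int) : Prop := A ≠ []
instance (A : List Int) (X : Int) (Y : Int) (Z : Int) : Decidable (Pre_solution A X Y Z) := by
  unfold Pre_solution; infer_instance

def pvWitness_solution : List Int × Int × Int × Int := ([2, 1, 3], 3, 2, 4)

def Spec_solution (A : List Int) (X : Int) (Y : Int) (Z : Int) (out : Int) : Prop :=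
  out = solution_alt A X Y Z
instance (A : List Int) (X : Int) (Y : Int) (Z : Int) (out : Int) :
    Decidable (Spec_solution A X Y Z out) := by unfold Spec_solution; infer_instance

-- ===== CLAIM (what is proved, stated in full; the proofs are below) =====
def Claim_equal_solution : Prop := ∀ (A : List Int) (X : Int) (Y : Int) (Z : Int),
  Dom_solution A X Y Z → Pre_solution A X Y Z → Spec_solution A X Y Z (solution A X Y Z)

-- ===== LEMMAS AND PROOFS =====

-- A's three-way per-element test factors: the time test is constant over the scan
theorem scanA_eq (t cap m : Int) (arr : List Int) : ∀ (i : Nat),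
    scanA t cap m arr i = if m ≤ t then findFit arr cap i else none := by
  induction arr with
  | nil => intro i; simp [scanA, findFit]
  | cons car rest ih =>
    intro i
    by_cases h : m ≤ t <;>
      simp [scanA, findFit, ih, h, ge_iff_le]

-- per-lane bridge between the two body shapes
theorem laneB_eq (t : Int) (arr : List Int) (cap m : Int) (d : PySem.Dict Int Int) :
    laneB t arr cap m d =
      (match scanA t cap m arr 0 with
       | some (i, car) => (arr.set i 0, cap - car, m + car, d.insert (i : Int) t, true)
       | none => (arr, cap, m, d, false)) := by
  rw [laneB, scanA_eq]
  by_cases h : m ≤ t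
  · rw [if_pos h, if_pos h]
  · rw [if_neg h, if_neg h]

-- the two loop bodies compute the same next state
theorem step_eq (t : Int) (s : PVSt) : stepA t s = (stepB t s).1 := by
  rw [stepA, stepB]
  simp only [laneB_eq]
  rcases h1 : scanA t s.cx s.mx s.arr 0 with _ | ⟨i1, c1⟩ <;> simp only [h1] <;> (try dsimp only) <;>
    (rcases h2 : scanA t s.cy s.my _ 0 with _ | ⟨i2, c2⟩ <;> simp only [h2] <;> (try dsimp only) <;>
      (rcases h3 : scanA t s.cz s.mz _ 0 with _ | ⟨i3, c3⟩ <;> simp only [h3] <;> rfl))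

-- a lane that does not act at time t does not act at any later time v that is still
-- before the lane's own activation mark
theorem laneB_noact_later (t v : Int) (arr : List Int) (cap mark : Int)
    (data : PySem.Dict Int Int)
    (h : (laneB t arr cap mark data).2.2.2.2 = false)
    (htv : t ≤ v) (hm : t < mark → v < mark) :
    laneB v arr cap mark data = (arr, cap, mark, data, false) := by
  rw [laneB] at h ⊢
  by_cases h1 : mark ≤ t
  · rw [if_pos h1] at h
    rw [if_pos (le_trans h1 htv)]
    cases hf : findFit arr cap 0 with
    | none => rfl
    | some p => rw [hf] at h; obtain ⟨i, car⟩ := p; simp at h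
  · have := hm (by omega)
    rw [if_neg (by omega)]

theorem stepB_noact_later (t v : Int) (s : PVSt) (h : (stepB t s).2 = false)
    (htv : t ≤ v) (hx : t < s.mx → v < s.mx) (hy : t < s.my → v < s.my)
    (hz : t < s.mz → v < s.mz) :
    stepB v s = (s, false) := by
  unfold stepB at h ⊢
  dsimp only at h ⊢
  simp only [Bool.or_eq_false_iff] at h
  obtain ⟨⟨h1, h2⟩, h3⟩ := h
  have e1 := laneB_noact _ _ _ _ _ h1
  simp only [e1] at h2 h3
  have e2 := laneB_noact _ _ _ _ _ h2
  simp only [e2] at h3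
  have e3 := laneB_noact _ _ _ _ _ h3
  have e1v := laneB_noact_later t v _ _ _ _ h1 htv hx
  simp only [e1v]
  have e2v := laneB_noact_later t v _ _ _ _ h2 htv hy
  simp only [e2v]
  have e3v := laneB_noact_later t v _ _ _ _ h3 htv hz
  simp only [e3v]
  rfl

-- idle stretch: if the body is a no-op on [a, a+g), A's busy loop is the identity
theorem loopA_idle (s : PVSt) : ∀ (g : Nat) (a : Int),
    (∀ v, a ≤ v → v < a + (g : Int) → stepA v s = s) → loopA g a s = s := by
  intro g
  induction g with
  | zero => intro a _; rfl
  | succ g ih =>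
    intro a h
    rw [loopA, h a (le_refl a) (by push_cast; omega)]
    exact ih (a + 1) (fun v hv hv' => h v (by omega) (by push_cast at hv' ⊢; omega))

-- idle prefix: A's busy loop may skip a no-op stretch
theorem loopA_shift (s : PVSt) : ∀ (k : Nat) (g : Nat) (a : Int),
    (∀ v, a ≤ v → v < a + (k : Int) → stepA v s = s) →
    loopA (k + g) a s = loopA g (a + (k : Int)) s := by
  intro k
  induction k with
  | zero => intro g a _; norm_num
  | succ k ih =>
    intro g a h
    have : k + 1 + g = (k + g) + 1 := by omega
    rw [this, loopA, h a (le_refl a) (by push_cast; omega)]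
    rw [ih g (a + 1) (fun v hv hv' => h v (by omega) (by push_cast at hv' ⊢; omega))]
    congr 1
    push_cast
    ring

-- main equivalence of the two loops
theorem loop_eq (maxD : Int) : ∀ (f : Nat) (t : Int) (s : PVSt),
    (f : Int) = maxD + 1 - t → t ≤ maxD → loopA f t s = loopB maxD t s := by
  intro f
  induction f using Nat.strong_induction_on with
  | _ f ih =>
    intro t s hf ht
    cases f with
    | zero => exfalso; simp at hf; omega
    | succ g =>
      rw [loopA, step_eq, loopB]
      by_cases hact : (stepB t s).2 = true
      · rw [dif_pos hact]
        by_cases hnext : t + 1 ≤ maxD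
        · rw [if_pos hnext]
          exact ih g (by omega) (t + 1) _ (by push_cast at hf ⊢; omega) hnext
        · have hg : g = 0 := by push_cast at hf; omega
          subst hg
          rw [if_neg hnext, loopA]
      · rw [dif_neg hact]
        have hs := stepB_noact t s (by simpa using hact)
        have hact' : (stepB t s).2 = false := by simpa using hact
        rw [hs]
        dsimp only
        have hgf : (g : Int) = maxD - t := by push_cast at hf; omega
        have noact_upto : ∀ (w : Int), (∀ m ∈ [s.mx, s.my, s.mz], t < m → w ≤ m) →
            ∀ v, t ≤ v → v < w → stepA v s = s := by
          intro w hw v hv1 hv2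
          have hb : ∀ m ∈ [s.mx, s.my, s.mz], t < m → v < m := fun m hm hlt =>
            lt_of_lt_of_le hv2 (hw m hm hlt)
          have := stepB_noact_later t v s hact' hv1
            (hb s.mx (by simp)) (hb s.my (by simp)) (hb s.mz (by simp))
          rw [step_eq, this]
        split
        next u hu =>
          obtain ⟨humem, hule⟩ := List.min?_eq_some_iff.mp hu
          simp only [List.mem_filter, decide_eq_true_eq] at humem
          obtain ⟨hum3, htu⟩ := humem
          have hub : ∀ m ∈ [s.mx, s.my, s.mz], t < m → u ≤ m := fun m hm hlt =>
            hule m (List.mem_filter.mpr ⟨hm, by simpa using hlt⟩)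
          by_cases humax : u ≤ maxD
          · rw [if_pos humax]
            have hkg : (u - (t + 1)).toNat ≤ g := by omega
            have hsplit : g = (u - (t + 1)).toNat + (g - (u - (t + 1)).toNat) :=
              (Nat.add_sub_cancel' hkg).symm
            rw [hsplit, loopA_shift s _ _ (t + 1)
              (fun v hv1 hv2 => noact_upto u hub v (by omega) (by push_cast at hv2 ⊢; omega))]
            have hjump : t + 1 + ((u - (t + 1)).toNat : Int) = u := by push_cast; omega
            rw [hjump]
            exact ih _ (by omega) u s (by push_cast; omega) humax
          · rw [if_neg humax]
            apply loopA_idle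
            intro v hv1 hv2
            exact noact_upto u hub v (by omega) (by push_cast at hv2; omega)
        next hu =>
          rw [List.min?_eq_none_iff, List.filter_eq_nil_iff] at hu
          apply loopA_idle
          intro v hv1 hv2
          refine noact_upto (maxD + 1)
            (fun m hm hlt => absurd (by simpa using hlt) (by simpa using hu m hm)) v (by omega) ?_
          push_cast at hv2
          omega
-- ===== VERDICT (by name: the statement is the Claim_ definition above) =====
theorem solution_spec : Claim_equal_solution := by
  intro A X Y Z _ _
  unfold Spec_solution solution solution_alt
  dsimp only
  suffices h : loopA ((max X (max Y Z)).toNat + 1) 0 ⟨A, X, Y, Z, 0, 0, 0, PySem.Dict.empty⟩ =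
      loopB (max X (max Y Z)) 0 ⟨A, X, Y, Z, 0, 0, 0, PySem.Dict.empty⟩ by rw [h]
  set maxD := max X (max Y Z) with hD
  set s0 : PVSt := ⟨A, X, Y, Z, 0, 0, 0, PySem.Dict.empty⟩ with hs0
  by_cases h0 : 0 ≤ maxD
  · exact loop_eq maxD _ 0 s0 (by push_cast; omega) h0
  · have h1 : maxD.toNat = 0 := by omega
    rw [h1, loopB]
    by_cases hact : (stepB 0 s0).2 = true
    · rw [dif_pos hact, if_neg (by omega)]
      exact step_eq 0 s0
    · rw [dif_neg hact]
      split
      next u hu =>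
        have hmem := (List.min?_eq_some_iff.mp hu).1
        simp only [List.mem_filter, decide_eq_true_eq] at hmem
        rw [if_neg (by omega)]
        exact step_eq 0 s0
      next hu => exact step_eq 0 s0
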